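-- pv_equiv track=rewrite | github.com/vanvsue001/Word-Guessing-Game | wordgame.py | WordsIndex
-- ===== SOURCE A (Python) =====
-- def WordsIndex(word, list): #assumes list is list of lists
--     i = -1
--     for aList in list:
--         i += 1
--         #if(word[0] in aList):
--         if(word in aList):
--             index = aList.index(word)
--             nestedIndex = [i,index]
--             return nestedIndex
-- ===== SOURCE B (Python) =====
-- def WordsIndex(word, list):  # build a first-occurrence index of every word, then a single dict lookup
--     first = {}
--     i = 0
--     for aList in list:
--         j = 0
--         for w in aList:
--             first.setdefault(w, [i, j])
--             j += 1
--         i += 1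
--     return first.get(word)
-- ===== Notes on version B (the rewrite author's own statement) =====
-- stated objective: alternative
-- what changed: A searches row by row with a membership test plus .index and early return; B instead builds a hash index (dict) of the first occurrence of every word in one full row-major pass and answers with a single dict.get lookup.
import Mathlib
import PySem

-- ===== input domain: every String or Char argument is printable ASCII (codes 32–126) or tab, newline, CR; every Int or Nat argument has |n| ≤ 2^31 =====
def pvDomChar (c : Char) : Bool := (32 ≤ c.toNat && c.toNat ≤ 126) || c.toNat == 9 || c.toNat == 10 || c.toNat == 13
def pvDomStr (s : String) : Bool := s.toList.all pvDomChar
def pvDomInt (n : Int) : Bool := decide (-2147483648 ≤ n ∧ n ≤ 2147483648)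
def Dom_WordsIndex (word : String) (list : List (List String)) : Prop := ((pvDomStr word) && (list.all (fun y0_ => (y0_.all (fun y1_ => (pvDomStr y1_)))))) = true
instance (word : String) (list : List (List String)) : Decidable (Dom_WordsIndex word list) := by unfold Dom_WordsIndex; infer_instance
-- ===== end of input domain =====

-- B replaces A's row-by-row search (membership + .index, early return) by a first-occurrence
-- dict built in one full row-major pass followed by a single dict.get lookup; same return value.


-- ===== PORT A =====
-- the for-loop over `list` with the counter i (starting at -1, incremented first in the body)
def WordsIndexLoopA (word : String) (i : Int) : List (List String) → Option (List Int)
  | [] => none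
  | aList :: rest =>
    let i' := i + 1
    if word ∈ aList then
      match PySem.List.index? aList word with
      | some index => some [i', (index : Int)]
      | none => none   -- unreachable: guarded by word ∈ aList
    else
      WordsIndexLoopA word i' rest

def WordsIndex (word : String) (list : List (List String)) : Option (List Int) :=
  WordsIndexLoopA word (-1) list

-- ===== PORT B =====
-- inner loop: first.setdefault(w, [i, j]) for each w in aList, with counter j
def WordsIndexRowB (i : Int) : Int → PySem.Dict String (List Int) → List String → PySem.Dict String (List Int)
  | _, first, [] => first
  | j, first, w :: ws => WordsIndexRowB i (j + 1) (first.setdefault w [i, j]) ws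

-- outer loop over the rows with counter i
def WordsIndexTblB : Int → PySem.Dict String (List Int) → List (List String) → PySem.Dict String (List Int)
  | _, first, [] => first
  | i, first, aList :: rest => WordsIndexTblB (i + 1) (WordsIndexRowB i 0 first aList) rest

def WordsIndex_alt (word : String) (list : List (List String)) : Option (List Int) :=
  (WordsIndexTblB 0 PySem.Dict.empty list).get? word

-- ===== PRECONDITION & SPEC =====
def Spec_WordsIndex (word : String) (list : List (List String)) (out : Option (List Int)) : Prop := out = WordsIndex_alt word list
instance (word : String) (list : List (List String)) (out : Option (List Int)) : Decidable (Spec_WordsIndex word list out) := by unfold Spec_WordsIndex; infer_instance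

-- ===== CLAIM (what is proved, stated in full; the proofs are below) =====
def Claim_equal_WordsIndex : Prop := ∀ (word : String) (list : List (List String)), Dom_WordsIndex word list → Spec_WordsIndex word list (WordsIndex word list)

-- ===== LEMMAS AND PROOFS =====
-- proof-side description of the search: the first match in a row, shifted by j
def findJ (word : String) (j : Int) : List String → Option Int
  | [] => none
  | w :: ws => if w = word then some j else findJ word (j + 1) ws

-- proof-side description of the row-major search over the rows starting at row i
def findIJ (word : String) (i : Int) : List (List String) → Option (List Int)
  | [] => none
  | r :: rs =>
    match findJ word 0 r with
    | some j => some [i, j]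
    | none => findIJ word (i + 1) rs

theorem setdefault_get? (d : PySem.Dict String (List Int)) (k k' : String) (v : List Int) :
    (d.setdefault k v).get? k' =
      match d.get? k with
      | some _ => d.get? k'
      | none => (d.insert k v).get? k' := by
  simp only [PySem.Dict.setdefault, PySem.Dict.contains_eq_isSome_get?]
  cases hk : d.get? k with
  | some v' => simp
  | none =>
    have hc : d.contains k = false := by
      rw [PySem.Dict.contains_eq_isSome_get?, hk]; rfl
    have he : d.insert k v = PySem.Dict.mk (d.items ++ [(k, v)]) :=
      PySem.Dict.ext (by simp [PySem.Dict.items_insert_of_not_contains, hc])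
    simp [he]

theorem rowB_get (word : String) (i : Int) (r : List String) :
    ∀ (j : Int) (d : PySem.Dict String (List Int)),
    (WordsIndexRowB i j d r).get? word =
      match d.get? word with
      | some v => some v
      | none => (findJ word j r).map (fun jj => [i, jj]) := by
  induction r with
  | nil => intro j d; cases hg : d.get? word <;> simp [WordsIndexRowB, findJ, hg]
  | cons w ws ih =>
    intro j d
    rw [WordsIndexRowB, ih, findJ, setdefault_get?]
    by_cases hw : w = word
    · subst hw
      cases hd : d.get? w with
      | some v => simp
      | none => simp [PySem.Dict.get?_insert_self]
    · rw [if_neg hw]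
      cases hd : d.get? w with
      | some v => rfl
      | none => rw [PySem.Dict.get?_insert_of_ne d [i, j] (fun h => hw h.symm)]

theorem tblB_get (word : String) (rs : List (List String)) :
    ∀ (i : Int) (d : PySem.Dict String (List Int)),
    (WordsIndexTblB i d rs).get? word =
      match d.get? word with
      | some v => some v
      | none => findIJ word i rs := by
  induction rs with
  | nil => intro i d; cases hg : d.get? word <;> simp [WordsIndexTblB, findIJ, hg]
  | cons r rest ih =>
    intro i d
    rw [WordsIndexTblB, ih, rowB_get, findIJ]
    cases hd : d.get? word with
    | some v => simp
    | none => cases findJ word 0 r <;> simp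

theorem findJ_eq_index? (word : String) (aList : List String) (j : Int) :
    findJ word j aList = (PySem.List.index? aList word).map (fun k : Nat => j + (k : Int)) := by
  induction aList generalizing j with
  | nil => simp [findJ, PySem.List.index?_eq_idxOf?, List.idxOf?]
  | cons w ws ih =>
    rw [findJ]
    by_cases h : w = word
    · subst h; rw [if_pos rfl, PySem.List.index?_cons_self]; simp
    · rw [if_neg h, ih, PySem.List.index?_cons_of_ne ws h]
      cases PySem.List.index? ws word <;> simp
      ring

theorem loopA_eq_findIJ (word : String) (list : List (List String)) (i : Int) :
    WordsIndexLoopA word i list = findIJ word (i + 1) list := by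
  induction list generalizing i with
  | nil => rfl
  | cons aList rest ih =>
    rw [WordsIndexLoopA, findIJ, findJ_eq_index?]
    cases hc : PySem.List.index? aList word with
    | some k =>
      have h : word ∈ aList :=
        (PySem.List.index?_isSome_iff aList word).mp (by rw [hc]; rfl)
      simp [h]
    | none =>
      have h : word ∉ aList := (PySem.List.index?_eq_none_iff aList word).mp hc
      simp [h, ih]

-- ===== VERDICT (by name: the statement is the Claim_ definition above) =====
theorem WordsIndex_spec : Claim_equal_WordsIndex := by
  intro word list _
  show WordsIndex word list = WordsIndex_alt word list
  unfold WordsIndex WordsIndex_alt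
  rw [tblB_get, loopA_eq_findIJ, PySem.Dict.get?_empty]
  norm_num
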